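-- pv_equiv track=rewrite | github.com/jasonpereira518/caseclosed | models/context.py | _strip_conversational_lead_in
-- ===== SOURCE A (Python) =====
-- def _strip_conversational_lead_in(text: str) -> str:
--     t = (text or "").strip()
--     if not t:
--         return t
--     low = t.lower()
--     for prefix in (
--         "i need help with ",
--         "i need help ",
--         "can you help with ",
--         "help with ",
--         "question about ",
--         "i have a question about ",
--     ):
--         if low.startswith(prefix):
--             return t[len(prefix) :].strip()
--     return t
-- ===== SOURCE B (Python) =====
-- _PREFIXES = (
--     "i need help with ",
--     "i need help ",
--     "can you help with ",
--     "help with ",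
--     "question about ",
--     "i have a question about ",
-- )
--
--
-- def _strip_conversational_lead_in(text: str) -> str:
--     t = (text or "").strip()
--     if not t:
--         return t
--     low = t.lower()
--     # Single left-to-right sweep over low, keeping the set of prefixes still
--     # viable at the current position and recording the longest one completed.
--     live = list(_PREFIXES)
--     best = 0
--     for i in range(len(low) + 1):
--         nxt = []
--         for p in live:
--             if len(p) == i:
--                 best = i
--             elif i < len(low) and p[i] == low[i]:
--                 nxt.append(p)
--         if not nxt:
--             break
--         live = nxt
--     return t[best:].strip() if best else t
-- ===== Notes on version B (the rewrite author's own statement) =====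
-- stated objective: alternative
-- what changed: Replaces A's per-prefix startswith scan (first match in tuple order wins) by a single left-to-right character sweep that keeps a shrinking set of live prefix candidates (parallel/trie-style matching) and records the longest completed prefix; longest-match coincides with A's answer because the only nested pair of prefixes is listed longest-first.
import Mathlib
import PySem

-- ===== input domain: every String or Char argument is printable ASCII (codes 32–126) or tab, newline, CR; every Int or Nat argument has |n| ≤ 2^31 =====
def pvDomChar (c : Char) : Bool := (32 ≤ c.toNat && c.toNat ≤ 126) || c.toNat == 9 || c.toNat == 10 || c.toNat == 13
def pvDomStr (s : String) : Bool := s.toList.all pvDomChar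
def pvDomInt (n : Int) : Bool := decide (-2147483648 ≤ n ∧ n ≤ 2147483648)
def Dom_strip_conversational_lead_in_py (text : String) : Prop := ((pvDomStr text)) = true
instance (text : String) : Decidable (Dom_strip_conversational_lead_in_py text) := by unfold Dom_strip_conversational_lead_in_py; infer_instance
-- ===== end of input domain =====

-- B replaces A's ordered per-prefix startswith scan by a single character sweep that filters a
-- live candidate set (parallel/trie-style matching) and keeps the longest completed prefix
-- (objective: alternative; longest-match = A's first-match because the one nested pair is ordered longest-first).


-- ===== PORT A =====
-- the tuple of prefixes, in A's order
def pvPrefixesA : List String :=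
  ["i need help with ", "i need help ", "can you help with ", "help with ",
   "question about ", "i have a question about "]

-- A's for-loop with its early return: the first matching prefix wins, 't[len(prefix):].strip()'
def pvLoopA (ps : List String) (low t : String) : String :=
  match ps with
  | [] => t
  | p :: rest =>
      if PySem.Str.startswith low p then
        PySem.Str.strip (PySem.Str.slice t (some (PySem.Str.len p)) none)
      else pvLoopA rest low t

def strip_conversational_lead_in_py (text : String) : String :=
  let t := PySem.Str.strip (if text == "" then "" else text)   -- (text or "").strip()
  if t == "" then t
  else pvLoopA pvPrefixesA (PySem.Str.lower t) t

-- ===== PORT B =====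
-- Source B's _PREFIXES, as char lists (B scans them character by character)
def pvPrefB : List (List Char) :=
  ["i need help with ".toList, "i need help ".toList, "can you help with ".toList,
   "help with ".toList, "question about ".toList, "i have a question about ".toList]

-- the body of Source B's inner 'for p in live' loop (state = (best, nxt));
-- p[i] == low[i] is ported as p[i]? = low[i]? — equal whenever Python's p[i] is in range,
-- which B's own filtering guarantees for every state it reaches
def pvStepB (low : List Char) (i : Nat) (st : Int × List (List Char)) (p : List Char) :
    Int × List (List Char) :=
  if p.length = i then ((i : Int), st.2)
  else if i < low.length ∧ p[i]? = low[i]? then (st.1, st.2 ++ [p])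
  else st

def pvInnerB (low : List Char) (i : Nat) (best : Int) (live : List (List Char)) :
    Int × List (List Char) :=
  live.foldl (pvStepB low i) (best, [])

-- Source B's 'for i in range(len(low)+1)' with its 'if not nxt: break'
def pvLoopB (low : List Char) : List Nat → Int → List (List Char) → Int
  | [], best, _ => best
  | i :: rest, best, live =>
      let st := pvInnerB low i best live
      if st.2.isEmpty then st.1 else pvLoopB low rest st.1 st.2

def strip_conversational_lead_in_py_alt (text : String) : String :=
  let t := PySem.Str.strip (if text == "" then "" else text)
  if t == "" then t
  else
    let low := (PySem.Str.lower t).toList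
    let best := pvLoopB low (List.range (low.length + 1)) 0 pvPrefB
    if best ≠ 0 then PySem.Str.strip (PySem.Str.slice t (some best) none) else t

-- ===== PRECONDITION & SPEC =====
def Spec_strip_conversational_lead_in_py (text : String) (out : String) : Prop := out = strip_conversational_lead_in_py_alt text
instance (text : String) (out : String) : Decidable (Spec_strip_conversational_lead_in_py text out) := by unfold Spec_strip_conversational_lead_in_py; infer_instance

-- ===== CLAIM (what is proved, stated in full; the proofs are below) =====
def Claim_equal_strip_conversational_lead_in_py : Prop := ∀ (text : String), Dom_strip_conversational_lead_in_py text → Spec_strip_conversational_lead_in_py text (strip_conversational_lead_in_py text)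

-- ===== LEMMAS AND PROOFS =====

-- the longest length of a member of L that is a prefix of low, maxed with b
def pvLongest (low : List Char) (b : Int) : List (List Char) → Int
  | [] => b
  | p :: L => if p <+: low then max (pvLongest low b L) (p.length : Int) else pvLongest low b L

lemma pv_mem_le_longest (low : List Char) (b : Int) {L : List (List Char)} {p : List Char}
    (hm : p ∈ L) (hp : p <+: low) : (p.length : Int) ≤ pvLongest low b L := by
  induction L with
  | nil => cases hm
  | cons q L ih =>
      rcases List.mem_cons.mp hm with rfl | hm'
      · simp only [pvLongest, if_pos hp]; exact le_max_right _ _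
      · simp only [pvLongest]
        split
        · exact le_trans (ih hm') (le_max_left _ _)
        · exact ih hm'

lemma pv_longest_raise (low : List Char) {b c : Int} (L : List (List Char)) (hbc : b ≤ c) :
    pvLongest low c L = max c (pvLongest low b L) := by
  induction L with
  | nil => simp [pvLongest, max_eq_left hbc]
  | cons p L ih =>
      simp only [pvLongest]
      split
      · rw [ih, max_assoc]
      · exact ih

lemma pv_longest_no_match (low : List Char) (b : Int) {L : List (List Char)}
    (h : ∀ p ∈ L, ¬ p <+: low) : pvLongest low b L = b := by
  induction L with
  | nil => rfl
  | cons p L ih =>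
      simp only [pvLongest, if_neg (h p List.mem_cons_self)]
      exact ih (fun q hq => h q (List.mem_cons_of_mem _ hq))

-- take-i agreement + full length i ⇒ actual prefix
lemma pv_take_prefix {low p : List Char} {i : Nat} (ht : p.take i = low.take i)
    (hl : p.length = i) : p <+: low := by
  have : p = low.take i := by
    calc p = p.take i := by rw [← hl, List.take_length]
    _ = low.take i := ht
  rw [this]; exact List.take_prefix _ _

-- a prefix agrees with low at every in-range index
lemma pv_prefix_get {low p : List Char} {i : Nat} (hp : p <+: low) (hi : i < p.length) :
    p[i]? = low[i]? := by
  obtain ⟨u, rfl⟩ := hp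
  rw [List.getElem?_append_left hi]

-- characterization of the inner fold
lemma pv_inner_spec (low : List Char) (i : Nat) (L : List (List Char)) :
    ∀ (b : Int) (acc : List (List Char)),
      L.foldl (pvStepB low i) (b, acc) =
        ((if L.any (fun p => p.length == i) then (i : Int) else b),
         acc ++ L.filter (fun p => decide (¬ p.length = i ∧ i < low.length ∧ p[i]? = low[i]?))) := by
  induction L with
  | nil => intro b acc; simp
  | cons p L ih =>
      intro b acc
      simp only [List.foldl_cons, List.any_cons, List.filter_cons, pvStepB]
      by_cases h1 : p.length = i
      · simp [h1, ih]
      · by_cases h2 : i < low.length ∧ p[i]? = low[i]?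
        · simp [h1, h2, ih]
        · simp [h1, h2, ih]

-- one sweep step preserves the longest-match value
lemma pv_longest_step (low : List Char) (i : Nat) (_hi : i ≤ low.length) :
    ∀ (L : List (List Char)) (b : Int), b ≤ (i : Int) →
    (∀ p ∈ L, i ≤ p.length ∧ p.take i = low.take i) →
    pvLongest low b L =
      pvLongest low (if L.any (fun p => p.length == i) then (i : Int) else b)
        (L.filter (fun p => decide (¬ p.length = i ∧ i < low.length ∧ p[i]? = low[i]?))) := by
  intro L
  induction L with
  | nil => intro b _ _; simp [pvLongest]
  | cons p L ih =>
      intro b hb hinv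
      obtain ⟨hlen, htk⟩ := hinv p List.mem_cons_self
      have hinv' : ∀ q ∈ L, i ≤ q.length ∧ q.take i = low.take i :=
        fun q hq => hinv q (List.mem_cons_of_mem _ hq)
      by_cases hpi : p.length = i
      · have hpref : p <+: low := pv_take_prefix htk hpi
        rw [List.filter_cons_of_neg (by simp [hpi])]
        rw [show ((p :: L).any fun q => q.length == i) = true from by simp [hpi]]
        simp only [if_true]
        rw [show pvLongest low b (p :: L) = max (pvLongest low b L) ((p.length : Int)) from by
          simp only [pvLongest]; rw [if_pos hpref]]
        rw [hpi]
        by_cases hA : (L.any fun q => q.length == i) = true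
        · have hIH := ih b hb hinv'
          rw [if_pos hA] at hIH
          rw [← hIH]
          obtain ⟨q, hqL, hql⟩ := List.any_eq_true.mp hA
          have hql' : q.length = i := by simpa using hql
          have hqpref : q <+: low := pv_take_prefix (hinv' q hqL).2 hql'
          have hle : (i : Int) ≤ pvLongest low b L := by
            have := pv_mem_le_longest low b hqL hqpref
            rwa [hql'] at this
          exact max_eq_left hle
        · have hIH := ih b hb hinv'
          rw [if_neg hA] at hIH
          rw [pv_longest_raise low _ hb, ← hIH, max_comm]
      · rw [show ((p :: L).any fun q => q.length == i) = (L.any fun q => q.length == i) from by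
          simp [hpi]]
        have hlt : i < p.length := lt_of_le_of_ne hlen (fun h => hpi h.symm)
        by_cases hpref : p <+: low
        · have hilow : i < low.length := lt_of_lt_of_le hlt hpref.length_le
          have hget : p[i]? = low[i]? := pv_prefix_get hpref hlt
          rw [List.filter_cons_of_pos (by simp [hpi, hilow, hget])]
          simp only [pvLongest]
          rw [if_pos hpref, if_pos hpref]
          rw [ih b hb hinv']
        · by_cases hkeep : (decide (¬ p.length = i ∧ i < low.length ∧ p[i]? = low[i]?)) = true
          · rw [List.filter_cons, if_pos hkeep]
            simp only [pvLongest]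
            rw [if_neg hpref, if_neg hpref]
            exact ih b hb hinv'
          · rw [List.filter_cons, if_neg hkeep]
            rw [show pvLongest low b (p :: L) = pvLongest low b L from by
              simp only [pvLongest]; rw [if_neg hpref]]
            exact ih b hb hinv'

-- the main sweep invariant: B's loop computes the longest match
lemma pv_loop_inv (low : List Char) :
    ∀ (k i : Nat) (best : Int) (live : List (List Char)),
      i + k = low.length + 1 → 0 ≤ best → best ≤ (i : Int) →
      (∀ p ∈ live, i ≤ p.length ∧ p.take i = low.take i) →
      pvLoopB low (List.range' i k) best live = pvLongest low best live := by
  intro k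
  induction k with
  | zero =>
      intro i best live hik _ _ hinv
      have : ∀ p ∈ live, ¬ p <+: low := by
        intro p hp hpref
        have h1 := (hinv p hp).1
        have h2 := hpref.length_le
        omega
      simp [pvLoopB, pv_longest_no_match low best this]
  | succ k ih =>
      intro i best live hik hb0 hbi hinv
      have hi : i ≤ low.length := by omega
      rw [List.range'_succ]
      simp only [pvLoopB, pvInnerB]
      rw [pv_inner_spec low i live best []]
      simp only [List.nil_append]
      set best' := (if live.any (fun p => p.length == i) then (i : Int) else best) with hbest'
      set nxt := live.filter (fun p => decide (¬ p.length = i ∧ i < low.length ∧ p[i]? = low[i]?)) with hnxt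
      have hstep := pv_longest_step low i hi live best hbi hinv
      rw [← hbest', ← hnxt] at hstep
      by_cases hemp : nxt.isEmpty
      · rw [if_pos hemp]
        rw [hstep, List.isEmpty_iff.mp hemp]
        rfl
      · rw [if_neg hemp]
        have hinv' : ∀ p ∈ nxt, i + 1 ≤ p.length ∧ p.take (i + 1) = low.take (i + 1) := by
          intro p hp
          rw [hnxt, List.mem_filter] at hp
          obtain ⟨hpl, hc⟩ := hp
          rw [decide_eq_true_iff] at hc
          obtain ⟨hne, hilow, hget⟩ := hc
          obtain ⟨hle, htk⟩ := hinv p hpl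
          refine ⟨by omega, ?_⟩
          rw [List.take_add_one, List.take_add_one, htk, hget]
        have hb0' : 0 ≤ best' := by
          rw [hbest']; split <;> omega
        have hbi' : best' ≤ ((i + 1 : Nat) : Int) := by
          rw [hbest']; split <;> omega
        rw [ih (i + 1) best' nxt (by omega) hb0' hbi' hinv']
        exact hstep.symm

-- two prefixes of the same string are comparable; used to exclude other literal matches
lemma pv_excl {p q low : List Char} (hp : p <+: low) (hpq : ¬ p <+: q) (hqp : ¬ q <+: p) :
    ¬ q <+: low :=
  fun hq => (List.prefix_or_prefix_of_prefix hp hq).elim hpq hqp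

-- A's ordered scan returns exactly the longest-match cut over pvPrefB:
-- at most the nested pair ("i need help with ", "i need help ") can match simultaneously,
-- and A's tuple lists it longest-first
lemma pv_A_eq_longest (low t : String) :
    pvLoopA pvPrefixesA low t =
      (if pvLongest low.toList 0 pvPrefB ≠ 0 then
        PySem.Str.strip (PySem.Str.slice t (some (pvLongest low.toList 0 pvPrefB)) none)
      else t) := by
  have key : ∀ p : String, PySem.Str.startswith low p = true ↔ p.toList <+: low.toList := by
    intro p; rw [PySem.Str.startswith_eq]; exact PySem.Chars.startswith_iff _ _
  simp only [pvLoopA, pvPrefixesA, pvLongest, pvPrefB]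
  by_cases h1 : PySem.Str.startswith low "i need help with " = true
  · have c1 := (key _).mp h1
    have c2 : "i need help ".toList <+: low.toList := List.IsPrefix.trans (by decide) c1
    have n3 : ¬ "can you help with ".toList <+: low.toList := pv_excl c1 (by decide) (by decide)
    have n4 : ¬ "help with ".toList <+: low.toList := pv_excl c1 (by decide) (by decide)
    have n5 : ¬ "question about ".toList <+: low.toList := pv_excl c1 (by decide) (by decide)
    have n6 : ¬ "i have a question about ".toList <+: low.toList := pv_excl c1 (by decide) (by decide)
    rw [if_pos h1, if_pos c1, if_pos c2, if_neg n3, if_neg n4, if_neg n5, if_neg n6]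
    rw [show PySem.Str.len "i need help with " = 17 from by decide]
    rw [show (("i need help with ".toList.length : Int)) = 17 from by decide, show (("i need help ".toList.length : Int)) = 12 from by decide]
    norm_num
  · have n1 : ¬ "i need help with ".toList <+: low.toList := fun h => h1 ((key _).mpr h)
    by_cases h2 : PySem.Str.startswith low "i need help " = true
    · have c2 := (key _).mp h2
      have n3 : ¬ "can you help with ".toList <+: low.toList := pv_excl c2 (by decide) (by decide)
      have n4 : ¬ "help with ".toList <+: low.toList := pv_excl c2 (by decide) (by decide)
      have n5 : ¬ "question about ".toList <+: low.toList := pv_excl c2 (by decide) (by decide)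
      have n6 : ¬ "i have a question about ".toList <+: low.toList := pv_excl c2 (by decide) (by decide)
      rw [if_neg h1, if_pos h2, if_neg n1, if_pos c2, if_neg n3, if_neg n4, if_neg n5, if_neg n6]
      rw [show PySem.Str.len "i need help " = 12 from by decide]
      rw [show (("i need help ".toList.length : Int)) = 12 from by decide]
      norm_num
    · have n2 : ¬ "i need help ".toList <+: low.toList := fun h => h2 ((key _).mpr h)
      by_cases h3 : PySem.Str.startswith low "can you help with " = true
      · have c3 := (key _).mp h3
        have n4 : ¬ "help with ".toList <+: low.toList := pv_excl c3 (by decide) (by decide)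
        have n5 : ¬ "question about ".toList <+: low.toList := pv_excl c3 (by decide) (by decide)
        have n6 : ¬ "i have a question about ".toList <+: low.toList := pv_excl c3 (by decide) (by decide)
        rw [if_neg h1, if_neg h2, if_pos h3, if_neg n1, if_neg n2, if_pos c3, if_neg n4,
          if_neg n5, if_neg n6]
        rw [show PySem.Str.len "can you help with " = 18 from by decide]
        rw [show (("can you help with ".toList.length : Int)) = 18 from by decide]
        norm_num
      · have n3 : ¬ "can you help with ".toList <+: low.toList := fun h => h3 ((key _).mpr h)
        by_cases h4 : PySem.Str.startswith low "help with " = true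
        · have c4 := (key _).mp h4
          have n5 : ¬ "question about ".toList <+: low.toList := pv_excl c4 (by decide) (by decide)
          have n6 : ¬ "i have a question about ".toList <+: low.toList :=
            pv_excl c4 (by decide) (by decide)
          rw [if_neg h1, if_neg h2, if_neg h3, if_pos h4, if_neg n1, if_neg n2, if_neg n3,
            if_pos c4, if_neg n5, if_neg n6]
          rw [show PySem.Str.len "help with " = 10 from by decide]
          rw [show (("help with ".toList.length : Int)) = 10 from by decide]
          norm_num
        · have n4 : ¬ "help with ".toList <+: low.toList := fun h => h4 ((key _).mpr h)
          by_cases h5 : PySem.Str.startswith low "question about " = true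
          · have c5 := (key _).mp h5
            have n6 : ¬ "i have a question about ".toList <+: low.toList :=
              pv_excl c5 (by decide) (by decide)
            rw [if_neg h1, if_neg h2, if_neg h3, if_neg h4, if_pos h5, if_neg n1, if_neg n2,
              if_neg n3, if_neg n4, if_pos c5, if_neg n6]
            rw [show PySem.Str.len "question about " = 15 from by decide]
            rw [show (("question about ".toList.length : Int)) = 15 from by decide]
            norm_num
          · have n5 : ¬ "question about ".toList <+: low.toList := fun h => h5 ((key _).mpr h)
            by_cases h6 : PySem.Str.startswith low "i have a question about " = true
            · have c6 := (key _).mp h6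
              rw [if_neg h1, if_neg h2, if_neg h3, if_neg h4, if_neg h5, if_pos h6, if_neg n1,
                if_neg n2, if_neg n3, if_neg n4, if_neg n5, if_pos c6]
              rw [show PySem.Str.len "i have a question about " = 24 from by decide]
              rw [show (("i have a question about ".toList.length : Int)) = 24 from by decide]
              norm_num
            · have n6 : ¬ "i have a question about ".toList <+: low.toList :=
                fun h => h6 ((key _).mpr h)
              rw [if_neg h1, if_neg h2, if_neg h3, if_neg h4, if_neg h5, if_neg h6, if_neg n1,
                if_neg n2, if_neg n3, if_neg n4, if_neg n5, if_neg n6]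
              norm_num

-- ===== VERDICT (by name: the statement is the Claim_ definition above) =====
theorem strip_conversational_lead_in_py_spec : Claim_equal_strip_conversational_lead_in_py := by
  intro text _
  unfold Spec_strip_conversational_lead_in_py
  unfold strip_conversational_lead_in_py strip_conversational_lead_in_py_alt
  dsimp only
  by_cases h : PySem.Str.strip (if text == "" then "" else text) == ""
  · rw [if_pos h, if_pos h]
  · rw [if_neg h, if_neg h]
    set t := PySem.Str.strip (if text == "" then "" else text)
    set low := PySem.Str.lower t
    have hrange : List.range (low.toList.length + 1) = List.range' 0 (low.toList.length + 1) :=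
      List.range_eq_range'
    rw [hrange, pv_loop_inv low.toList (low.toList.length + 1) 0 0 pvPrefB (by omega) le_rfl
      (by norm_num) (by intro p _; simp)]
    exact pv_A_eq_longest low t
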